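-- pv_equiv track=rewrite | github.com/aierwiki/rwkvtune | examples/train_grpo_single_gpu.py | _extract_turn_pairs
-- ===== SOURCE A (Python) =====
-- from typing import Any, Dict, List, Tuple
--
-- def _extract_turn_pairs(conversations: List[Dict[str, Any]]) -> Tuple[str, List[Tuple[str, str]]]:
--     """
--     Extract (system_prompt, [(user, assistant), ...]) from ShareGPT conversation list.
--     """
--     system_prompt = ""
--     pairs: List[Tuple[str, str]] = []
--
--     # Find first system message (optional)
--     for turn in conversations:
--         role = turn.get("from", "").lower()
--         if role == "system":
--             system_prompt = turn.get("value", "")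
--             break
--
--     # Collect user/assistant pairs in order
--     last_user: str | None = None
--     for turn in conversations:
--         role = turn.get("from", "").lower()
--         content = turn.get("value", "")
--         if role in ("human", "user"):
--             last_user = content
--         elif role in ("gpt", "assistant") and last_user is not None:
--             pairs.append((last_user, content))
--             last_user = None
--
--     return system_prompt, pairs
-- ===== SOURCE B (Python) =====
-- def _extract_turn_pairs(conversations):
--     """Single fused pass: system prompt and user/assistant pairs in one loop."""
--     system_prompt = ""
--     found_system = False
--     last_user = None
--     pairs = []
--     for turn in conversations:
--         role = turn.get("from", "").lower()
--         if role == "system" and not found_system: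
--             system_prompt = turn.get("value", "")
--             found_system = True
--         elif role in ("human", "user"):
--             last_user = turn.get("value", "")
--         elif role in ("gpt", "assistant") and last_user is not None:
--             pairs.append((last_user, turn.get("value", "")))
--             last_user = None
--     return system_prompt, pairs
-- ===== Notes on version B (the rewrite author's own statement) =====
-- stated objective: alternative
-- what changed: Fuses A's two sequential scans (one with break for the first system turn, one for user/assistant pairs) into a single pass carrying a found_system flag alongside last_user.
import Mathlib
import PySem

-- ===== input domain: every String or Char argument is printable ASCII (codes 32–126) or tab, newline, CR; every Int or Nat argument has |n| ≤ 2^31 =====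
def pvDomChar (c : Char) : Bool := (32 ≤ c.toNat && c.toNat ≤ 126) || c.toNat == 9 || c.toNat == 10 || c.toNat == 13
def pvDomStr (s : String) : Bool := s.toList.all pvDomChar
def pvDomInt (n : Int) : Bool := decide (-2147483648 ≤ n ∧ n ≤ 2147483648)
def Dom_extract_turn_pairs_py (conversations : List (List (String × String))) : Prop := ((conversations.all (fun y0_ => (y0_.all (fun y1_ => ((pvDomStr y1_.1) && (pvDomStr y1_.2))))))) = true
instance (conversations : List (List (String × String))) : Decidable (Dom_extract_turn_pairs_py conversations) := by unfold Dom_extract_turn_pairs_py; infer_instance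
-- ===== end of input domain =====

-- B fuses A's two sequential scans into a single pass carrying a found_system flag; same return value (objective: alternative decomposition).

-- turn.get(k, d) on the association list (first match, Python dict lookup)
def pyDictGetD (t : List (String × String)) (k d : String) : String :=
  match t.find? (fun p => p.1 == k) with
  | some p => p.2
  | none => d

-- ===== PORT A =====
-- A's first loop: scan for the first system turn, break on hit ("" if none)
def findSysA : List (List (String × String)) → String
  | [] => ""
  | t :: rest =>
    if PySem.Str.lower (pyDictGetD t "from" "") == "system" then pyDictGetD t "value" ""
    else findSysA rest

-- A's second loop body, state = (last_user, pairs)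
def pairStepA (st : Option String × List (String × String)) (t : List (String × String)) :
    Option String × List (String × String) :=
  let role := PySem.Str.lower (pyDictGetD t "from" "")
  let content := pyDictGetD t "value" ""
  if role == "human" || role == "user" then (some content, st.2)
  else if role == "gpt" || role == "assistant" then
    match st.1 with
    | some lu => (none, st.2 ++ [(lu, content)])
    | none => st
  else st

def extract_turn_pairs_py (conversations : List (List (String × String))) : String × (List (String × String)) :=
  (findSysA conversations, (conversations.foldl pairStepA (none, [])).2)

-- ===== PORT B =====
-- B's single-pass loop body, state = (system_prompt, found_system, last_user, pairs)
def stepB (st : String × Bool × Option String × List (String × String)) (t : List (String × String)) :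
    String × Bool × Option String × List (String × String) :=
  let role := PySem.Str.lower (pyDictGetD t "from" "")
  if role == "system" && !st.2.1 then (pyDictGetD t "value" "", true, st.2.2)
  else if role == "human" || role == "user" then (st.1, st.2.1, some (pyDictGetD t "value" ""), st.2.2.2)
  else if role == "gpt" || role == "assistant" then
    match st.2.2.1 with
    | some lu => (st.1, st.2.1, none, st.2.2.2 ++ [(lu, pyDictGetD t "value" "")])
    | none => st
  else st

def extract_turn_pairs_py_alt (conversations : List (List (String × String))) : String × (List (String × String)) :=
  let fin := conversations.foldl stepB ("", false, none, [])
  (fin.1, fin.2.2.2)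

-- ===== PRECONDITION & SPEC =====
def Spec_extract_turn_pairs_py (conversations : List (List (String × String))) (out : String × (List (String × String))) : Prop := out = extract_turn_pairs_py_alt conversations
instance (conversations : List (List (String × String))) (out : String × (List (String × String))) : Decidable (Spec_extract_turn_pairs_py conversations out) := by unfold Spec_extract_turn_pairs_py; infer_instance

-- ===== CLAIM (what is proved, stated in full; the proofs are below) =====
def Claim_equal_extract_turn_pairs_py : Prop := ∀ (conversations : List (List (String × String))), Dom_extract_turn_pairs_py conversations → Spec_extract_turn_pairs_py conversations (extract_turn_pairs_py conversations)

-- ===== LEMMAS AND PROOFS =====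

def hasSys (l : List (List (String × String))) : Bool :=
  l.any (fun t => PySem.Str.lower (pyDictGetD t "from" "") == "system")

-- stepB keeps (system_prompt, found_system) unchanged once found_system or role ≠ "system"
lemma stepB_keep (s : String) (b : Bool) (lu : Option String) (ps : List (String × String))
    (t : List (String × String))
    (h : (PySem.Str.lower (pyDictGetD t "from" "") == "system" && !b) = false) :
    stepB (s, b, lu, ps) t = (s, b, (stepB (s, b, lu, ps) t).2.2) := by
  simp only [stepB, h, Bool.false_eq_true, if_false]
  split
  · rfl
  · split
    · split <;> rfl
    · rfl

-- the pairs part of stepB is exactly pairStepA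
lemma stepB_pairs (s : String) (b : Bool) (lu : Option String) (ps : List (String × String))
    (t : List (String × String)) :
    (stepB (s, b, lu, ps) t).2.2 = pairStepA (lu, ps) t := by
  simp only [stepB, pairStepA]
  by_cases hs : PySem.Str.lower (pyDictGetD t "from" "") = "system"
  · simp [hs]
    split <;> rfl
  · have h1 : (PySem.Str.lower (pyDictGetD t "from" "") == "system") = false := by
      simpa using hs
    simp only [h1, Bool.false_and, Bool.false_eq_true, if_false]
    split
    · rfl
    · split
      · split <;> rfl
      · rfl

lemma foldl_stepB_pairs (l : List (List (String × String))) :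
    ∀ s b lu ps, (l.foldl stepB (s, b, lu, ps)).2.2 = l.foldl pairStepA (lu, ps) := by
  induction l with
  | nil => intro s b lu ps; rfl
  | cons t r ih =>
    intro s b lu ps
    rw [List.foldl_cons, List.foldl_cons]
    rcases hst : stepB (s, b, lu, ps) t with ⟨s', b', lu', ps'⟩
    have hp := stepB_pairs s b lu ps t
    rw [hst] at hp
    rw [ih s' b' lu' ps', ← hp]

lemma foldl_stepB_true (l : List (List (String × String))) :
    ∀ s lu ps, (l.foldl stepB (s, true, lu, ps)).1 = s := by
  induction l with
  | nil => intro s lu ps; rfl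
  | cons t r ih =>
    intro s lu ps
    rw [List.foldl_cons, stepB_keep s true lu ps t (by simp)]
    exact ih s _ _

lemma findSysA_of_no_sys (l : List (List (String × String))) (h : hasSys l = false) :
    findSysA l = "" := by
  induction l with
  | nil => rfl
  | cons t r ih =>
    simp only [hasSys, List.any_cons, Bool.or_eq_false_iff] at h
    simp only [findSysA, h.1, Bool.false_eq_true, if_false]
    exact ih h.2

lemma foldl_stepB_false (l : List (List (String × String))) :
    ∀ s lu ps, (l.foldl stepB (s, false, lu, ps)).1 = if hasSys l then findSysA l else s := by
  induction l with
  | nil => intro s lu ps; rfl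
  | cons t r ih =>
    intro s lu ps
    by_cases hs : (PySem.Str.lower (pyDictGetD t "from" "") == "system") = true
    · rw [List.foldl_cons]
      have hstep : stepB (s, false, lu, ps) t = (pyDictGetD t "value" "", true, lu, ps) := by
        simp [stepB, hs]
      rw [hstep, foldl_stepB_true]
      have : hasSys (t :: r) = true := by simp [hasSys, hs]
      simp [this, findSysA, hs]
    · have hs' : (PySem.Str.lower (pyDictGetD t "from" "") == "system") = false := by
        simpa using hs
      rw [List.foldl_cons, stepB_keep s false lu ps t (by simp [hs'])]
      rw [ih s _ _]
      have h2 : hasSys (t :: r) = hasSys r := by simp [hasSys, hs']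
      have h3 : findSysA (t :: r) = findSysA r := by simp [findSysA, hs']
      rw [h2, h3]

-- ===== VERDICT (by name: the statement is the Claim_ definition above) =====
theorem extract_turn_pairs_py_spec : Claim_equal_extract_turn_pairs_py := by
  intro convs _
  unfold Spec_extract_turn_pairs_py extract_turn_pairs_py extract_turn_pairs_py_alt
  refine Prod.ext ?_ ?_
  · show findSysA convs = (convs.foldl stepB ("", false, none, [])).1
    rw [foldl_stepB_false]
    by_cases h : hasSys convs = true
    · simp [h]
    · have h' : hasSys convs = false := by simpa using h
      simp [h', findSysA_of_no_sys convs h']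
  · show (convs.foldl pairStepA (none, [])).2 = (convs.foldl stepB ("", false, none, [])).2.2.2
    rw [foldl_stepB_pairs]
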